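-- pv_equiv track=rewrite | github.com/Rahul2k5/cf_codes | one_two.py | one_two
-- ===== SOURCE A (Python) =====
-- def one_two(arr):
--     count=0
--     for i in arr:
--         if i==2:
--             count+=1
--     if count==0:
--         return 1
--     if count%2==1:
--         return -1
--     else:
--         x=0
--         for i in range(len(arr)):
--             if arr[i]==2:
--                 x+=1
--                 if x==count//2:
--                     return i+1
-- ===== SOURCE B (Python) =====
-- def one_two(arr):
--     # tortoise-and-hare: a slow cursor advances to the next 2 once per every
--     # second 2 the main scan sees, so the middle 2 is at hand when the scan ends
--     count = 0
--     j = 0      # slow scan pointer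
--     mid = -1   # 1-based position of the (count//2)-th 2 seen so far
--     for v in arr:
--         if v == 2:
--             count += 1
--             if count % 2 == 0:
--                 while arr[j] != 2:
--                     j += 1
--                 mid = j + 1
--                 j += 1
--     if count == 0:
--         return 1
--     if count % 2 == 1:
--         return -1
--     return mid
-- ===== Notes on version B (the rewrite author's own statement) =====
-- stated objective: alternative
-- what changed: B is a tortoise-and-hare single pass: a slow cursor advances to the next 2 every second 2 the main scan sees, so the middle 2 is already located when the scan ends; A counts first and then re-scans the whole array to select the (count/2)-th 2.
import Mathlib
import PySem

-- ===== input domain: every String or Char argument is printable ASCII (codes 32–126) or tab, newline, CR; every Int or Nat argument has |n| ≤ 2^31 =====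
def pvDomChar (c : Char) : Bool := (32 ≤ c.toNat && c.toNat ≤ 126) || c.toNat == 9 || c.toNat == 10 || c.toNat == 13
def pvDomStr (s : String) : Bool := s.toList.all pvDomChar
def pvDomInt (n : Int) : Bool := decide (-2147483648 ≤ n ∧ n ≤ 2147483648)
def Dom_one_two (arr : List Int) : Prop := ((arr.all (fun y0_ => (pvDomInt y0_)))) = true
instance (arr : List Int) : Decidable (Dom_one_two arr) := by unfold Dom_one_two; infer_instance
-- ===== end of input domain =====

-- B replaces A's count-then-reselect double scan by a tortoise-and-hare single pass:
-- a slow cursor chases the next 2 once per every second 2 seen, so the middle 2 is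
-- already at hand when the scan ends.

-- ===== PORT A =====
-- A's second 'for i in range(len(arr))' loop: walks the list with the running index i
-- and counter x, returns i+1 when x reaches tgt.  Python falls off the loop (returns
-- None) only when fewer than tgt twos remain, which never happens on the reached path;
-- the base case 0 is unreachable there.
def oneTwoLoop : List Int → Int → Nat → Nat → Int
  | [], _, _, _ => 0
  | a :: t, i, x, tgt =>
    if a == 2 then
      if x + 1 == tgt then i + 1 else oneTwoLoop t (i + 1) (x + 1) tgt
    else oneTwoLoop t (i + 1) x tgt

def one_two (arr : List Int) : Int :=
  let count := arr.foldl (fun c i => if i == 2 then c + 1 else c) (0 : Nat)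
  if count == 0 then 1
  else if count % 2 == 1 then -1
  else oneTwoLoop arr 0 0 (count / 2)

-- ===== PORT B =====
-- B's inner 'while arr[j] != 2: j += 1'.  On B's reached path a 2 always lies at or
-- beyond j, so arr[j] never raises; the range guard only makes the recursion total,
-- and arr.getD j 0 is exact for the in-range access.
def nextTwo (arr : List Int) (j : Nat) : Nat :=
  if h : j < arr.length then
    if arr.getD j 0 == 2 then j else nextTwo arr (j + 1)
  else j
termination_by arr.length - j

-- the body of B's 'for v in arr' loop, state (count, j, mid)
def oneTwoStep (arr : List Int) (s : Nat × Nat × Int) (v : Int) : Nat × Nat × Int :=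
  if v == 2 then
    let count := s.1 + 1
    if count % 2 == 0 then
      let k := nextTwo arr s.2.1
      (count, k + 1, (k : Int) + 1)
    else (count, s.2.1, s.2.2)
  else s

def one_two_alt (arr : List Int) : Int :=
  let st := arr.foldl (oneTwoStep arr) (0, 0, -1)
  if st.1 == 0 then 1
  else if st.1 % 2 == 1 then -1
  else st.2.2

-- ===== PRECONDITION & SPEC =====
def Spec_one_two (arr : List Int) (out : Int) : Prop := out = one_two_alt arr
instance (arr : List Int) (out : Int) : Decidable (Spec_one_two arr out) := by unfold Spec_one_two; infer_instance

-- ===== CLAIM (what is proved, stated in full; the proofs are below) =====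
def Claim_equal_one_two : Prop := ∀ (arr : List Int), Dom_one_two arr → Spec_one_two arr (one_two arr)

-- ===== LEMMAS AND PROOFS =====

-- 1-based positions (as Int) of the 2s, starting the index at i
def posl : List Int → Int → List Int
  | [], _ => []
  | a :: t, i => if a == 2 then (i + 1) :: posl t (i + 1) else posl t (i + 1)

-- 0-based positions (as Nat) of the 2s, starting the index at i
def npos : List Int → Nat → List Nat
  | [], _ => []
  | a :: t, i => if a == 2 then i :: npos t (i + 1) else npos t (i + 1)

-- index of the first 2 (length if none)
def fstTwo : List Int → Nat
  | [] => 0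
  | a :: t => if a == 2 then 0 else fstTwo t + 1

-- slow-pointer value after t successful advances
def Jp (arr : List Int) : Nat → Nat
  | 0 => 0
  | t + 1 => nextTwo arr (Jp arr t) + 1

-- mid value after t successful advances
def Mp (arr : List Int) (t : Nat) : Int := if t = 0 then -1 else (Jp arr t : Int)

theorem posl_eq_map (l : List Int) (i : Nat) :
    posl l (i : Int) = (npos l i).map (fun k : Nat => ((k : Int) + 1)) := by
  induction l generalizing i with
  | nil => rfl
  | cons a t ih =>
    have hcast : ((i : Int) + 1) = (((i + 1 : Nat)) : Int) := by push_cast; ring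
    by_cases h : a = 2
    · simp only [posl, npos, h, beq_self_eq_true, if_true, List.map_cons, hcast,
        ih (i + 1)]
    · have hne : (a == 2) = false := by simp [h]
      simp only [posl, npos, hne, Bool.false_eq_true, if_false, hcast, ih (i + 1)]

theorem npos_length (l : List Int) (i : Nat) :
    (npos l i).length = l.countP (fun a => a == 2) := by
  induction l generalizing i with
  | nil => rfl
  | cons a t ih =>
    by_cases h : a = 2 <;> simp [npos, h, List.countP_cons, ih (i + 1)]

theorem foldl_count (l : List Int) (n : Nat) :
    l.foldl (fun c i => if i == 2 then c + 1 else c) n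
      = n + l.countP (fun a => a == 2) := by
  induction l generalizing n with
  | nil => rfl
  | cons a t ih =>
    rw [List.foldl_cons, ih]
    by_cases h : a = 2 <;> simp [h, List.countP_cons] <;> omega

theorem oneTwoLoop_eq_posl (l : List Int) (i : Int) (x tgt : Nat)
    (hx : x < tgt) (hle : tgt - x ≤ (posl l i).length) :
    oneTwoLoop l i x tgt = (posl l i).getD (tgt - x - 1) 0 := by
  induction l generalizing i x with
  | nil => simp [posl] at hle; omega
  | cons a t ih =>
    by_cases h : a = 2
    · simp only [oneTwoLoop, posl, h, beq_self_eq_true, if_true]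
      by_cases he : x + 1 = tgt
      · have : tgt - x - 1 = 0 := by omega
        simp [he, this]
      · have h1 : x + 1 < tgt := by omega
        have h2 : tgt - (x + 1) ≤ (posl t (i + 1)).length := by
          simp [posl, h] at hle; omega
        have hne : (x + 1 == tgt) = false := by simp [he]
        simp only [hne, Bool.false_eq_true, if_false]
        rw [ih (i + 1) (x + 1) h1 h2]
        have : tgt - x - 1 = (tgt - (x + 1) - 1) + 1 := by omega
        simp [this]
    · have hne : (a == 2) = false := by simp [h]
      simp only [oneTwoLoop, posl, hne, Bool.false_eq_true, if_false]
      exact ih (i + 1) x hx (by simpa [posl, hne] using hle)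

theorem npos_cons (l : List Int) (i k : Nat) (rest : List Nat)
    (h : npos l i = k :: rest) :
    k = i + fstTwo l ∧ i ≤ k ∧ k < i + l.length ∧
      npos (l.drop (k + 1 - i)) (k + 1) = rest := by
  induction l generalizing i with
  | nil => simp [npos] at h
  | cons a t ih =>
    by_cases ha : a = 2
    · simp only [npos, ha, beq_self_eq_true, if_true, List.cons.injEq] at h
      obtain ⟨hk, hr⟩ := h
      subst hk
      refine ⟨by simp [fstTwo, ha], le_refl _, by simp, ?_⟩
      have : i + 1 - i = 1 := by omega
      simpa [this] using hr
    · have hne : (a == 2) = false := by simp [ha]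
      simp only [npos, hne, Bool.false_eq_true, if_false] at h
      obtain ⟨h1, h2, h3, h4⟩ := ih (i + 1) h
      refine ⟨by simp [fstTwo, hne]; omega, by omega, by simp; omega, ?_⟩
      have hd : k + 1 - i = (k + 1 - (i + 1)) + 1 := by omega
      rw [hd] at *
      simpa using h4

theorem nextTwo_eq (n : Nat) : ∀ (arr : List Int) (j : Nat),
    arr.length - j = n → j ≤ arr.length →
    nextTwo arr j = j + fstTwo (arr.drop j) := by
  induction n with
  | zero =>
    intro arr j hn hle
    have hj : j = arr.length := by omega
    rw [nextTwo]
    simp [hj, fstTwo]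
  | succ m ih =>
    intro arr j hn hle
    have hj : j < arr.length := by omega
    have hdrop : arr.drop j = arr[j] :: arr.drop (j + 1) :=
      List.drop_eq_getElem_cons hj
    have hgd : arr.getD j 0 = arr[j] := List.getD_eq_getElem arr 0 hj
    rw [nextTwo]
    simp only [hj, dif_pos, hgd]
    by_cases h2 : arr[j] = 2
    · simp [h2, hdrop, fstTwo]
    · have hne : (arr[j] == 2) = false := by simp [h2]
      simp only [hne, Bool.false_eq_true, if_false]
      rw [ih arr (j + 1) (by omega) (by omega), hdrop]
      simp [fstTwo, hne]
      omega

-- invariant of the slow-pointer chain: after t advances the pointer sits just past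
-- the t-th 2 and the untouched 2s are exactly the remaining ones
theorem Jp_inv (arr : List Int) : ∀ t, t ≤ (npos arr 0).length →
    Jp arr t ≤ arr.length ∧
      npos (arr.drop (Jp arr t)) (Jp arr t) = (npos arr 0).drop t := by
  intro t
  induction t with
  | zero => intro _; exact ⟨Nat.zero_le _, by simp [Jp]⟩
  | succ t ih =>
    intro hlt
    obtain ⟨hJ, hnp⟩ := ih (by omega)
    have ht : t < (npos arr 0).length := by omega
    have hdrop : (npos arr 0).drop t = (npos arr 0)[t] :: (npos arr 0).drop (t + 1) :=
      List.drop_eq_getElem_cons ht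
    rw [hdrop] at hnp
    obtain ⟨hk, hkl, hku, hsh⟩ := npos_cons _ _ _ _ hnp
    have hklen : (npos arr 0)[t] < arr.length := by
      have := List.length_drop (l := arr) (i := Jp arr t)
      omega
    have hnt : nextTwo arr (Jp arr t) = (npos arr 0)[t] := by
      rw [nextTwo_eq (arr.length - Jp arr t) arr (Jp arr t) rfl hJ]
      omega
    have hJs : Jp arr (t + 1) = (npos arr 0)[t] + 1 := by
      simp [Jp, hnt]
    constructor
    · omega
    · rw [hJs]
      have hdd : (arr.drop (Jp arr t)).drop ((npos arr 0)[t] + 1 - Jp arr t)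
          = arr.drop ((npos arr 0)[t] + 1) := by
        rw [List.drop_drop]
        congr 1
        omega
      rw [← hdd]
      exact hsh

theorem nextTwo_Jp (arr : List Int) (t : Nat) (ht : t < (npos arr 0).length) :
    nextTwo arr (Jp arr t) = (npos arr 0)[t] := by
  obtain ⟨hJ, hnp⟩ := Jp_inv arr t (by omega)
  have hdrop : (npos arr 0).drop t = (npos arr 0)[t] :: (npos arr 0).drop (t + 1) :=
    List.drop_eq_getElem_cons ht
  rw [hdrop] at hnp
  obtain ⟨hk, hkl, hku, -⟩ := npos_cons _ _ _ _ hnp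
  rw [nextTwo_eq (arr.length - Jp arr t) arr (Jp arr t) rfl hJ]
  omega

theorem fold_inv (arr : List Int) (l : List Int) : ∀ (c0 : Nat),
    l.foldl (oneTwoStep arr) (c0, Jp arr (c0 / 2), Mp arr (c0 / 2))
      = (c0 + l.countP (fun a => a == 2),
         Jp arr ((c0 + l.countP (fun a => a == 2)) / 2),
         Mp arr ((c0 + l.countP (fun a => a == 2)) / 2)) := by
  induction l with
  | nil => intro c0; simp
  | cons a t ih =>
    intro c0
    rw [List.foldl_cons]
    by_cases ha : a = 2
    · have step : oneTwoStep arr (c0, Jp arr (c0 / 2), Mp arr (c0 / 2)) a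
          = (c0 + 1, Jp arr ((c0 + 1) / 2), Mp arr ((c0 + 1) / 2)) := by
        by_cases hpar : (c0 + 1) % 2 = 0
        · have h2 : (c0 + 1) / 2 = c0 / 2 + 1 := by omega
          simp only [oneTwoStep, ha, beq_self_eq_true, if_true, hpar, beq_self_eq_true,
            if_true, h2]
          refine Prod.ext rfl (Prod.ext rfl ?_)
          simp [Jp, Mp]
        · have h2 : (c0 + 1) / 2 = c0 / 2 := by omega
          have hb : ((c0 + 1) % 2 == 0) = false := by simp [hpar]
          simp [oneTwoStep, ha, hb, h2]
      rw [step, ih (c0 + 1)]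
      have : c0 + 1 + t.countP (fun a => a == 2)
          = c0 + (a :: t).countP (fun a => a == 2) := by
        simp [List.countP_cons, ha]; omega
      rw [this]
    · have hne : (a == 2) = false := by simp [ha]
      have step : oneTwoStep arr (c0, Jp arr (c0 / 2), Mp arr (c0 / 2)) a
          = (c0, Jp arr (c0 / 2), Mp arr (c0 / 2)) := by
        simp [oneTwoStep, hne]
      rw [step, ih c0]
      simp [List.countP_cons, hne]

-- ===== VERDICT (by name: the statement is the Claim_ definition above) =====
theorem one_two_spec : Claim_equal_one_two := by
  intro arr _
  unfold Spec_one_two one_two one_two_alt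
  have hc := foldl_count arr 0
  rw [hc, Nat.zero_add]
  have hst : arr.foldl (oneTwoStep arr) (0, 0, -1)
      = (arr.countP (fun a => a == 2),
         Jp arr (arr.countP (fun a => a == 2) / 2),
         Mp arr (arr.countP (fun a => a == 2) / 2)) := by
    have := fold_inv arr arr 0
    simpa [Jp, Mp] using this
  rw [hst]
  set c := arr.countP (fun a => a == 2) with hcdef
  by_cases h0 : c = 0
  · simp [h0]
  · by_cases hodd : c % 2 = 1
    · simp [h0, hodd]
    · have hlen : (npos arr 0).length = c := npos_length arr 0
      have hpos : 1 ≤ c / 2 := by omega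
      have hidx : c / 2 - 1 < (npos arr 0).length := by omega
      have hA : oneTwoLoop arr 0 0 (c / 2)
          = ((npos arr 0)[c / 2 - 1] : Int) + 1 := by
        have hA1 := oneTwoLoop_eq_posl arr 0 0 (c / 2) (by omega)
          (by rw [show posl arr (0:Int) = posl arr ((0:Nat):Int) from by norm_num,
                posl_eq_map]; simp [hlen]; omega)
        rw [hA1]
        rw [show posl arr (0:Int) = posl arr ((0:Nat):Int) from by norm_num,
          posl_eq_map]
        have : c / 2 - 0 - 1 = c / 2 - 1 := by omega
        rw [this]
        rw [List.getD_eq_getElem _ 0 (by simpa using hidx)]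
        simp
      have hB : Mp arr (c / 2) = ((npos arr 0)[c / 2 - 1] : Int) + 1 := by
        have hne : c / 2 ≠ 0 := by omega
        have hJ : Jp arr (c / 2) = (npos arr 0)[c / 2 - 1] + 1 := by
          conv_lhs => rw [show c / 2 = (c / 2 - 1) + 1 from by omega]
          rw [Jp, nextTwo_Jp arr (c / 2 - 1) hidx]
        rw [Mp, if_neg hne, hJ]
        simp
      have hb0 : (c == 0) = false := by simp [h0]
      have hb1 : (c % 2 == 1) = false := by simp [hodd]
      simp only [hb0, hb1, Bool.false_eq_true, if_false]
      rw [hA]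
      exact hB.symm
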